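-- pv_equiv track=rewrite | github.com/dabigail2107/GenePredictionHMM | source/format_data.py | clean_hash_runs
-- ===== SOURCE A (Python) =====
-- from typing import Dict, List, Tuple
--
-- BACKGROUND = {'E','I','X'}
--
-- def is_valid_transition_char(tchar: Dict[str,set], a: str, b: str) -> bool:
--     return (a == b) or (b in tchar.get(a, set()))
--
-- def clean_hash_runs(seq: str, tchar: Dict[str,set]) -> str:
--     """Replace '#' runs using neighboring context while enforcing valid transitions"""
--     lst = list(seq); n = len(lst)
--     def nearest_left(i: int):
--         j = i-1
--         while j>=0 and lst[j]=='#':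
--             j -= 1
--         return lst[j] if j>=0 else None
--     def nearest_right(j: int):
--         k = j+1
--         while k<n and lst[k]=='#':
--             k += 1
--         return lst[k] if k<n else None
--
--     i = 0
--     while i < n:
--         if lst[i] != '#':
--             i += 1; continue
--         j = i
--         while j < n and lst[j] == '#':
--             j += 1
--         L = nearest_left(i)
--         R = nearest_right(j-1)
--         fill = 'X'
--         if L and R and (L in BACKGROUND) and (R in BACKGROUND) and L == R:
--             fill = L
--         elif L and L in BACKGROUND:
--             fill = L
--         elif R and R in BACKGROUND:
--             fill = R
--         if L and not is_valid_transition_char(tchar, L, fill):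
--             fill = 'X'
--         if R and not is_valid_transition_char(tchar, fill, R):
--             fill = 'X'
--         for k in range(i, j):
--             lst[k] = fill
--         i = j
--     return ''.join(lst)
-- ===== SOURCE B (Python) =====
-- from typing import Dict, List, Tuple
--
-- BACKGROUND = {'E', 'I', 'X'}
--
-- def is_valid_transition_char(tchar: Dict[str, set], a: str, b: str) -> bool:
--     return (a == b) or (b in tchar.get(a, set()))
--
-- def fill_for(tchar: Dict[str, set], L, R) -> str:
--     fill = 'X'
--     if L and R and (L in BACKGROUND) and (R in BACKGROUND) and L == R:
--         fill = L
--     elif L and L in BACKGROUND: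
--         fill = L
--     elif R and R in BACKGROUND:
--         fill = R
--     if L and not is_valid_transition_char(tchar, L, fill):
--         fill = 'X'
--     if R and not is_valid_transition_char(tchar, fill, R):
--         fill = 'X'
--     return fill
--
-- def clean_hash_runs(seq: str, tchar: Dict[str, set]) -> str:
--     """Replace '#' runs using neighboring context while enforcing valid transitions.
--
--     Two table-building passes (nearest non-'#' to the left / to the right),
--     then one forward scan that emits output pieces per maximal '#' run."""
--     n = len(seq)
--     # prev_nh[k]: nearest non-'#' character strictly before index k (None if none)
--     prev_nh = []
--     last = None
--     for ch in seq:
--         prev_nh.append(last)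
--         if ch != '#':
--             last = ch
--     # next_nh[k]: nearest non-'#' character at index >= k (None if none); size n+1
--     next_nh = [None] * (n + 1)
--     for k in range(n - 1, -1, -1):
--         next_nh[k] = seq[k] if seq[k] != '#' else next_nh[k + 1]
--     # single forward scan: carry the length of the pending '#' run
--     pieces = []
--     run = 0
--     for k, ch in enumerate(seq):
--         if ch == '#':
--             run += 1
--         else:
--             if run:
--                 pieces.append(fill_for(tchar, prev_nh[k - run], next_nh[k]) * run)
--                 run = 0
--             pieces.append(ch)
--     if run:
--         pieces.append(fill_for(tchar, prev_nh[n - run], next_nh[n]) * run)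
--     return ''.join(pieces)
-- ===== Notes on version B (the rewrite author's own statement) =====
-- stated objective: alternative
-- what changed: Replaces A's in-place list mutation with per-run nearest_left/nearest_right re-scans by two table-building passes (nearest non-'#' to the left / to the right) plus one forward scan that carries the pending '#'-run length and emits output pieces; the fill decision logic is kept byte-identical.
import Mathlib
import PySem

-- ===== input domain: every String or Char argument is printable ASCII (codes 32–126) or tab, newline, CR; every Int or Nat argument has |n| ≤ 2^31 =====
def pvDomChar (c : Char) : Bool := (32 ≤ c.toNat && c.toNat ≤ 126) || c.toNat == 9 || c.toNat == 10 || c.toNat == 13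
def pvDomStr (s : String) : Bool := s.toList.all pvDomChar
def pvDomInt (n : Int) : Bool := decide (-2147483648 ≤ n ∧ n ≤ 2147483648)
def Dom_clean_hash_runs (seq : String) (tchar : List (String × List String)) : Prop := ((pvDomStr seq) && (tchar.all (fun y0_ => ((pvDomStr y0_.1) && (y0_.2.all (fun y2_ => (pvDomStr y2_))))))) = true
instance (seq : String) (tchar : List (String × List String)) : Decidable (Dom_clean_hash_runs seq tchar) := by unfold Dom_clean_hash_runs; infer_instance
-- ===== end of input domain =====

-- B re-implements A with two table-building passes (nearest non-'#' left/right) and one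
-- forward scan emitting output pieces, instead of A's in-place mutation with per-run
-- neighbour re-scans; objective: alternative decomposition (same asymptotic cost).

-- ===== PORT A =====
-- helper shared by both Pythons (module-level constant and function)
def pyBACKGROUND : List Char := ['E', 'I', 'X']

-- tchar.get(a, set()): first match in the association list; membership of the 1-char string b
def is_valid_transition_char (tchar : List (String × List String)) (a b : Char) : Bool :=
  (a == b) ||
    (match tchar.find? (fun p => p.1 == String.ofList [a]) with
     | some p => p.2.contains (String.ofList [b])
     | none => false)

-- while j >= 0 and lst[j] == '#': j -= 1;  return lst[j] if j >= 0 else None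
def nlLoopA (lst : List Char) (j : Int) : Option Char :=
  if h : 0 ≤ j ∧ PySem.List.pyGet? lst j = some '#' then nlLoopA lst (j - 1)
  else if 0 ≤ j then PySem.List.pyGet? lst j else none
termination_by (j + 1).toNat
decreasing_by omega

def nearestLeftA (lst : List Char) (i : Int) : Option Char := nlLoopA lst (i - 1)

-- while k < n and lst[k] == '#': k += 1;  return lst[k] if k < n else None
def nrLoopA (lst : List Char) (n : Int) (k : Int) : Option Char :=
  if h : k < n ∧ PySem.List.pyGet? lst k = some '#' then nrLoopA lst n (k + 1)
  else if k < n then PySem.List.pyGet? lst k else none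
termination_by (n - k).toNat
decreasing_by omega

def nearestRightA (lst : List Char) (n : Int) (j : Int) : Option Char := nrLoopA lst n (j + 1)

-- inner: while j < n and lst[j] == '#': j += 1
def jloopA (lst : List Char) (n : Int) (j : Int) : Int :=
  if h : j < n ∧ PySem.List.pyGet? lst j = some '#' then jloopA lst n (j + 1)
  else j
termination_by (n - j).toNat
decreasing_by omega

-- for k in range(i, j): lst[k] = fill
def setRangeA (lst : List Char) (i j : Int) (fill : Char) : List Char :=
  (PySem.List.pyRange i j 1).foldl (fun l k => PySem.List.pySetD l k fill) lst

-- outer while loop of A; fuel is a totality guard only (i strictly increases each step)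
def loopA (tchar : List (String × List String)) (n : Int) : Nat → Int → List Char → List Char
  | 0, _, lst => lst
  | fuel + 1, i, lst =>
    if i < n then
      match PySem.List.pyGet? lst i with
      | none => lst        -- unreachable: Python's lst[i] is in range when 0 ≤ i < n
      | some ch =>
        if ch != '#' then loopA tchar n fuel (i + 1) lst
        else
          let j := jloopA lst n i
          let L := nearestLeftA lst i
          let R := nearestRightA lst n (j - 1)
          let fill : Char :=
            match L, R with
            | some l, some r =>
              if pyBACKGROUND.contains l && pyBACKGROUND.contains r && (l == r) then l
              else if pyBACKGROUND.contains l then l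
              else if pyBACKGROUND.contains r then r
              else 'X'
            | some l, none => if pyBACKGROUND.contains l then l else 'X'
            | none, some r => if pyBACKGROUND.contains r then r else 'X'
            | none, none => 'X'
          let fill : Char :=
            match L with
            | some l => if !(is_valid_transition_char tchar l fill) then 'X' else fill
            | none => fill
          let fill : Char :=
            match R with
            | some r => if !(is_valid_transition_char tchar fill r) then 'X' else fill
            | none => fill
          loopA tchar n fuel j (setRangeA lst i j fill)
    else lst

def clean_hash_runs (seq : String) (tchar : List (String × List String)) : String :=
  let lst := seq.toList
  let n := PySem.List.len lst
  String.ofList (loopA tchar n (lst.length + 1) 0 lst)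

-- ===== PORT B =====
-- fill_for helper of B (verbatim decision logic of the task)
def fillFor (tchar : List (String × List String)) (L R : Option Char) : Char :=
  let fill : Char :=
    match L, R with
    | some l, some r =>
      if pyBACKGROUND.contains l && pyBACKGROUND.contains r && (l == r) then l
      else if pyBACKGROUND.contains l then l
      else if pyBACKGROUND.contains r then r
      else 'X'
    | some l, none => if pyBACKGROUND.contains l then l else 'X'
    | none, some r => if pyBACKGROUND.contains r then r else 'X'
    | none, none => 'X'
  let fill : Char :=
    match L with
    | some l => if !(is_valid_transition_char tchar l fill) then 'X' else fill
    | none => fill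
  match R with
  | some r => if !(is_valid_transition_char tchar fill r) then 'X' else fill
  | none => fill

def clean_hash_runs_alt (seq : String) (tchar : List (String × List String)) : String :=
  let cs := seq.toList
  let n := cs.length
  -- forward pass: prev_nh[k] = nearest non-'#' strictly before index k
  let prevSt := cs.foldl
    (fun (st : List (Option Char) × Option Char) ch =>
      (st.2 :: st.1, if ch != '#' then some ch else st.2))
    ([], none)
  let prev_nh := prevSt.1.reverse
  -- backward pass: next_nh[k] = nearest non-'#' at index ≥ k (size n + 1)
  let next_nh := cs.foldr
    (fun ch acc => (if ch != '#' then some ch else acc.headD none) :: acc) [none]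
  -- single forward scan carrying the pending '#'-run length
  let st := cs.zipIdx.foldl
    (fun (st : List Char × Nat) p =>
      if p.1 == '#' then (st.1, st.2 + 1)
      else if st.2 != 0 then
        (st.1 ++ List.replicate st.2
            (fillFor tchar (prev_nh.getD (p.2 - st.2) none) (next_nh.getD p.2 none))
          ++ [p.1], 0)
      else (st.1 ++ [p.1], 0))
    ([], 0)
  let out :=
    if st.2 != 0 then
      st.1 ++ List.replicate st.2
        (fillFor tchar (prev_nh.getD (n - st.2) none) (next_nh.getD n none))
    else st.1
  String.mk out

-- ===== PRECONDITION & SPEC =====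
def Spec_clean_hash_runs (seq : String) (tchar : List (String × List String)) (out : String) : Prop := out = clean_hash_runs_alt seq tchar
instance (seq : String) (tchar : List (String × List String)) (out : String) : Decidable (Spec_clean_hash_runs seq tchar out) := by unfold Spec_clean_hash_runs; infer_instance

-- ===== CLAIM (what is proved, stated in full; the proofs are below) =====
def Claim_equal_clean_hash_runs : Prop := ∀ (seq : String) (tchar : List (String × List String)), Dom_clean_hash_runs seq tchar → Spec_clean_hash_runs seq tchar (clean_hash_runs seq tchar)

-- ===== LEMMAS AND PROOFS =====

-- canonical by-runs description both ports are proved equal to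
def canon (tchar : List (String × List String)) : Option Char → List Char → List Char
  | _, [] => []
  | L, c :: cs =>
    if h : c == '#' then
      let rest := List.dropWhile (fun x => x == '#') (c :: cs)
      List.replicate (List.takeWhile (fun x => x == '#') (c :: cs)).length
          (fillFor tchar L rest.head?)
        ++ canon tchar L rest
    else c :: canon tchar (some c) cs
termination_by _ l => l.length
decreasing_by
  · rw [List.dropWhile_cons]
    simp only [h, if_true]
    have := List.length_dropWhile_le (fun x => x == '#') cs
    simp only [List.length_cons]
    omega
  · simp

lemma canon_nil (tchar : List (String × List String)) (L : Option Char) :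
    canon tchar L [] = [] := by
  rw [canon]

lemma canon_cons_ne (tchar : List (String × List String)) (L : Option Char)
    {c : Char} (cs : List Char) (h : c ≠ '#') :
    canon tchar L (c :: cs) = c :: canon tchar (some c) cs := by
  rw [canon]
  simp [h]

lemma head?_dropWhile_ne {p : Char → Bool} {l : List Char} {c : Char}
    (h : (l.dropWhile p).head? = some c) : p c = false := by
  induction l with
  | nil => simp at h
  | cons x xs ih =>
    rw [List.dropWhile_cons] at h
    split at h
    · exact ih h
    · simp_all

lemma takeWhile_hash_run (t : Nat) (rest : List Char)
    (hr : ∀ c, rest.head? = some c → c ≠ '#') :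
    List.takeWhile (fun x => x == '#') (List.replicate t '#' ++ rest)
      = List.replicate t '#' := by
  induction t with
  | zero =>
    simp only [List.replicate_zero, List.nil_append]
    cases rest with
    | nil => rfl
    | cons r rs =>
      rw [List.takeWhile_cons_of_neg]
      simp [hr r rfl]
  | succ t ih =>
    simp [List.replicate_succ, ih]

lemma dropWhile_hash_run (t : Nat) (rest : List Char)
    (hr : ∀ c, rest.head? = some c → c ≠ '#') :
    List.dropWhile (fun x => x == '#') (List.replicate t '#' ++ rest) = rest := by
  induction t with
  | zero =>
    simp only [List.replicate_zero, List.nil_append]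
    cases rest with
    | nil => rfl
    | cons r rs =>
      rw [List.dropWhile_cons_of_neg]
      simp [hr r rfl]
  | succ t ih =>
    simp [List.replicate_succ, ih]

lemma canon_run (tchar : List (String × List String)) (L : Option Char)
    {t : Nat} (rest : List Char) (ht : 0 < t)
    (hr : ∀ c, rest.head? = some c → c ≠ '#') :
    canon tchar L (List.replicate t '#' ++ rest)
      = List.replicate t (fillFor tchar L rest.head?) ++ canon tchar L rest := by
  obtain ⟨t', rfl⟩ : ∃ t', t = t' + 1 := ⟨t - 1, by omega⟩
  have hrepl : List.replicate (t' + 1) '#' ++ rest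
      = '#' :: (List.replicate t' '#' ++ rest) := by simp [List.replicate_succ]
  rw [hrepl, canon]
  have h1 := takeWhile_hash_run (t' + 1) rest hr
  have h2 := dropWhile_hash_run (t' + 1) rest hr
  rw [hrepl] at h1 h2
  rw [dif_pos (by rfl : ('#' == '#') = true)]
  simp only [h1, h2, List.length_replicate]

lemma canon_irrel (tchar : List (String × List String)) (L1 L2 : Option Char)
    (l : List Char) (h : ∀ c, l.head? = some c → c ≠ '#') :
    canon tchar L1 l = canon tchar L2 l := by
  cases l with
  | nil => rw [canon_nil, canon_nil]
  | cons c cs =>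
    rw [canon_cons_ne _ _ _ (h c rfl), canon_cons_ne _ _ _ (h c rfl)]

lemma fillFor_mem (tchar : List (String × List String)) (L R : Option Char) :
    fillFor tchar L R ∈ pyBACKGROUND := by
  unfold fillFor
  rcases L with _ | l <;> rcases R with _ | r <;>
    dsimp only <;> (try split_ifs) <;>
    first
      | decide
      | simp_all [pyBACKGROUND]

lemma fillFor_ne_hash (tchar : List (String × List String)) (L R : Option Char) :
    fillFor tchar L R ≠ '#' := by
  have h := fillFor_mem tchar L R
  simp only [pyBACKGROUND, List.mem_cons, List.mem_singleton, List.not_mem_nil, or_false] at h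
  rcases h with h | h | h <;> rw [h] <;> decide

-- A-side: the left / right neighbour scans and the run scan, characterised
lemma nl_eq (done todo : List Char) (hd : ∀ c ∈ done, c ≠ '#') :
    nlLoopA (done ++ todo) ((done.length : Int) - 1) = done.getLast? := by
  rcases done.eq_nil_or_concat' with rfl | ⟨l, c, rfl⟩
  · rw [nlLoopA]
    norm_num
  · have hidx : ((l ++ [c]).length : Int) - 1 = (l.length : Nat) := by
      simp
    have hget : PySem.List.pyGet? (l ++ [c] ++ todo) ((l.length : Nat) : Int) = some c := by
      rw [List.append_assoc]
      exact PySem.List.pyGet?_append_length l (([c] ++ todo).tail) c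
    have hc : c ≠ '#' := hd c (by simp)
    rw [nlLoopA, hidx]
    rw [dif_neg (by simp [hc])]
    rw [if_pos (by positivity), hget, List.getLast?_concat]

lemma nr_eq (lst rest : List Char) (a : Nat) (hdrop : lst.drop a = rest)
    (hr : ∀ c, rest.head? = some c → c ≠ '#') :
    nrLoopA lst (lst.length : Int) ((a : Nat) : Int) = rest.head? := by
  cases rest with
  | nil =>
    have hlen : lst.length ≤ a := by
      have := congrArg List.length hdrop
      simp at this
      omega
    rw [nrLoopA]
    rw [dif_neg (by omega)]
    rw [if_neg (by omega)]
    rfl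
  | cons c cs =>
    have hget : PySem.List.pyGet? lst ((a : Nat) : Int) = some c := by
      rw [PySem.List.pyGet?_natCast, ← List.head?_drop, hdrop]
      rfl
    have ha : a < lst.length := by
      by_contra hcon
      rw [List.drop_eq_nil_of_le (by omega)] at hdrop
      simp at hdrop
    have hc : c ≠ '#' := hr c rfl
    rw [nrLoopA]
    rw [dif_neg (by simp [hget, hc])]
    rw [if_pos (by omega), hget]
    rfl

lemma jloop_eq (t : Nat) : ∀ (lst rest : List Char) (a : Nat),
    lst.drop a = List.replicate t '#' ++ rest →
    (∀ c, rest.head? = some c → c ≠ '#') →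
    jloopA lst (lst.length : Int) ((a : Nat) : Int) = ((a + t : Nat) : Int) := by
  induction t with
  | zero =>
    intro lst rest a hdrop hr
    rw [jloopA]
    rw [dif_neg ?_]
    · norm_num
    · simp only [List.replicate_zero, List.nil_append] at hdrop
      rintro ⟨h1, h2⟩
      rw [PySem.List.pyGet?_natCast, ← List.head?_drop, hdrop] at h2
      exact hr _ h2 rfl
  | succ t ih =>
    intro lst rest a hdrop hr
    have ha : a < lst.length := by
      by_contra hcon
      rw [List.drop_eq_nil_of_le (by omega)] at hdrop
      have := congrArg List.length hdrop
      simp at this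
      omega
    have hget : PySem.List.pyGet? lst ((a : Nat) : Int) = some '#' := by
      rw [PySem.List.pyGet?_natCast, ← List.head?_drop, hdrop]
      simp [List.replicate_succ]
    have hdrop' : lst.drop (a + 1) = List.replicate t '#' ++ rest := by
      have : lst.drop (a + 1) = (lst.drop a).drop 1 := by
        rw [List.drop_drop]
      rw [this, hdrop]
      simp [List.replicate_succ]
    rw [jloopA]
    rw [dif_pos ⟨by omega, hget⟩]
    have hcast : ((a : Nat) : Int) + 1 = (((a + 1 : Nat)) : Int) := by push_cast; ring
    rw [hcast, ih lst rest (a + 1) hdrop' hr]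
    congr 1
    omega

lemma setRange_eq (t : Nat) : ∀ (done rest : List Char) (fill : Char),
    setRangeA (done ++ (List.replicate t '#' ++ rest)) ((done.length : Nat) : Int)
        (((done.length + t : Nat)) : Int) fill
      = done ++ (List.replicate t fill ++ rest) := by
  induction t with
  | zero =>
    intro done rest fill
    unfold setRangeA
    rw [PySem.List.pyRange_one_eq_nil (by push_cast; omega)]
    simp [List.replicate]
  | succ t ih =>
    intro done rest fill
    unfold setRangeA
    rw [PySem.List.pyRange_one_cons (by push_cast; omega)]
    rw [List.foldl_cons]
    have hset : PySem.List.pySetD (done ++ (List.replicate (t + 1) '#' ++ rest))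
        ((done.length : Nat) : Int) fill
        = (done ++ [fill]) ++ (List.replicate t '#' ++ rest) := by
      rw [PySem.List.pySetD_natCast]
      rw [List.set_append_right _ _ (le_refl done.length)]
      simp [List.replicate_succ]
    rw [hset]
    have h1 : ((done.length : Nat) : Int) + 1 = (((done ++ [fill]).length : Nat) : Int) := by
      simp
    have h2 : (((done.length + (t + 1) : Nat)) : Int) = (((done ++ [fill]).length + t : Nat) : Int) := by
      simp
      omega
    rw [h1, h2]
    have := ih (done ++ [fill]) rest fill
    unfold setRangeA at this
    rw [this]
    simp [List.replicate_succ]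

lemma loopA_zero (tchar : List (String × List String)) (n i : Int) (lst : List Char) :
    loopA tchar n 0 i lst = lst := rfl

lemma loopA_stop (tchar : List (String × List String)) {n i : Int} (fuel : Nat)
    (lst : List Char) (h : ¬ i < n) :
    loopA tchar n (fuel + 1) i lst = lst := by
  rw [loopA, if_neg h]

lemma loopA_step_ne (tchar : List (String × List String)) {n i : Int} (fuel : Nat)
    {lst : List Char} {c : Char} (h1 : i < n)
    (hget : PySem.List.pyGet? lst i = some c) (hc : c ≠ '#') :
    loopA tchar n (fuel + 1) i lst = loopA tchar n fuel (i + 1) lst := by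
  rw [loopA, if_pos h1, hget]
  simp [hc]

lemma loopA_step_hash (tchar : List (String × List String)) {n i : Int} (fuel : Nat)
    {lst : List Char} (h1 : i < n)
    (hget : PySem.List.pyGet? lst i = some '#') :
    loopA tchar n (fuel + 1) i lst
      = loopA tchar n fuel (jloopA lst n i)
          (setRangeA lst i (jloopA lst n i)
            (fillFor tchar (nearestLeftA lst i)
              (nearestRightA lst n (jloopA lst n i - 1)))) := by
  rw [loopA, if_pos h1, hget]
  rfl

lemma getLast?_append_replicate (done : List Char) {t : Nat} (fill : Char) (ht : 0 < t) :
    (done ++ List.replicate t fill).getLast? = some fill := by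
  obtain ⟨t', rfl⟩ : ∃ t', t = t' + 1 := ⟨t - 1, by omega⟩
  rw [List.replicate_succ', ← List.append_assoc, List.getLast?_concat]

lemma loopA_canon (tchar : List (String × List String)) :
    ∀ (fuel : Nat) (todo done : List Char),
    (∀ c ∈ done, c ≠ '#') → todo.length ≤ fuel →
    loopA tchar (((done.length + todo.length : Nat)) : Int) fuel
        ((done.length : Nat) : Int) (done ++ todo)
      = done ++ canon tchar done.getLast? todo := by
  intro fuel
  induction fuel with
  | zero =>
    intro todo done hd hlen
    have : todo = [] := List.eq_nil_of_length_eq_zero (by omega)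
    subst this
    rw [loopA_zero, canon_nil, List.append_nil]
  | succ fuel ih =>
    intro todo done hd hlen
    cases todo with
    | nil =>
      rw [loopA_stop tchar fuel _ (by simp), canon_nil, List.append_nil]
    | cons c rest =>
      have h1 : ((done.length : Nat) : Int) < (((done.length + (c :: rest).length : Nat)) : Int) := by
        have : 0 < (c :: rest).length := by simp
        push_cast
        omega
      have hget : PySem.List.pyGet? (done ++ c :: rest) ((done.length : Nat) : Int) = some c :=
        PySem.List.pyGet?_append_length done rest c
      by_cases hc : c = '#'
      · subst hc
        -- split the '#' run
        set t := (List.takeWhile (fun x => x == '#') ('#' :: rest)).length with ht_def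
        set rest' := List.dropWhile (fun x => x == '#') ('#' :: rest) with hrest_def
        have hrepl : List.takeWhile (fun x => x == '#') ('#' :: rest) = List.replicate t '#' := by
          apply List.eq_replicate_of_mem
          intro b hb
          have := List.mem_takeWhile_imp hb
          simpa using this
        have hsplit : '#' :: rest = List.replicate t '#' ++ rest' := by
          rw [← hrepl, hrest_def, List.takeWhile_append_dropWhile]
        have htpos : 0 < t := by
          rw [ht_def]
          rw [List.takeWhile_cons_of_pos (by rfl)]
          simp
        have hrest' : ∀ x, rest'.head? = some x → x ≠ '#' := by
          intro x hx
          have := head?_dropWhile_ne hx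
          simpa using this
        have hlenrun : ('#' :: rest).length = t + rest'.length := by
          conv_lhs => rw [hsplit]
          simp
        have hlen_eq : (done ++ '#' :: rest).length = done.length + ('#' :: rest).length := by
          simp
        have hdrop : (done ++ '#' :: rest).drop done.length = '#' :: rest := List.drop_left
        have hj : jloopA (done ++ '#' :: rest) (((done ++ '#' :: rest).length : Nat) : Int)
            ((done.length : Nat) : Int) = (((done.length + t : Nat)) : Int) :=
          jloop_eq t _ rest' done.length (by rw [hdrop, hsplit]) hrest'
        have hL : nearestLeftA (done ++ '#' :: rest) ((done.length : Nat) : Int) = done.getLast? := by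
          unfold nearestLeftA
          exact nl_eq done _ hd
        have hdrop2 : (done ++ '#' :: rest).drop (done.length + t) = rest' := by
          conv_lhs => rw [hsplit, ← List.append_assoc]
          have : done.length + t = (done ++ List.replicate t '#').length := by simp
          rw [this, List.drop_left]
        have hR : nearestRightA (done ++ '#' :: rest) (((done ++ '#' :: rest).length : Nat) : Int)
            ((((done.length + t : Nat)) : Int) - 1) = rest'.head? := by
          unfold nearestRightA
          have harg : (((done.length + t : Nat)) : Int) - 1 + 1 = (((done.length + t : Nat)) : Int) := by
            ring
          rw [harg]
          exact nr_eq _ rest' (done.length + t) hdrop2 hrest'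
        -- rewrite n into the list-length form used by the scan lemmas
        have hn : (((done.length + ('#' :: rest).length : Nat)) : Int)
            = (((done ++ '#' :: rest).length : Nat) : Int) := by simp
        rw [hn, loopA_step_hash tchar fuel (by rw [← hn]; exact h1) hget, hj, hL, hR]
        set fill := fillFor tchar done.getLast? rest'.head? with hfill_def
        have hset : setRangeA (done ++ '#' :: rest) ((done.length : Nat) : Int)
            (((done.length + t : Nat)) : Int) fill = done ++ (List.replicate t fill ++ rest') := by
          conv_lhs => rw [hsplit]
          exact setRange_eq t done rest' fill
        rw [hset]
        -- apply the induction hypothesis with the filled run appended to `done`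
        have hd' : ∀ x ∈ done ++ List.replicate t fill, x ≠ '#' := by
          intro x hx
          rcases List.mem_append.1 hx with hx | hx
          · exact hd x hx
          · rw [List.eq_of_mem_replicate hx, hfill_def]
            exact fillFor_ne_hash tchar _ _
        have hlen' : rest'.length ≤ fuel := by
          have h2 : ('#' :: rest).length ≤ fuel + 1 := hlen
          omega
        have hi' : (((done.length + t : Nat)) : Int)
            = (((done ++ List.replicate t fill).length : Nat) : Int) := by simp
        have hn' : (((done ++ '#' :: rest).length : Nat) : Int)
            = ((((done ++ List.replicate t fill).length + rest'.length : Nat)) : Int) := by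
          have h2 := hlenrun
          simp only [List.length_append, List.length_cons, List.length_replicate] at h2 ⊢
          push_cast
          omega
        have hlst' : done ++ (List.replicate t fill ++ rest')
            = (done ++ List.replicate t fill) ++ rest' := by
          rw [List.append_assoc]
        rw [hi', hn', hlst', ih rest' (done ++ List.replicate t fill) hd' hlen']
        -- fold everything back into canon
        have hlast : (done ++ List.replicate t fill).getLast? = some fill :=
          getLast?_append_replicate done fill htpos
        rw [hlast, canon_irrel tchar (some fill) done.getLast? rest' hrest']
        conv_rhs => rw [hsplit, canon_run tchar done.getLast? rest' htpos hrest']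
        rw [← hfill_def, List.append_assoc]
      · rw [loopA_step_ne tchar fuel h1 hget hc]
        have hi' : ((done.length : Nat) : Int) + 1 = (((done ++ [c]).length : Nat) : Int) := by
          simp
        have hn' : (((done.length + (c :: rest).length : Nat)) : Int)
            = ((((done ++ [c]).length + rest.length : Nat)) : Int) := by
          simp
          omega
        have hlst' : done ++ c :: rest = (done ++ [c]) ++ rest := by simp
        have hd' : ∀ x ∈ done ++ [c], x ≠ '#' := by
          intro x hx
          rcases List.mem_append.1 hx with hx | hx
          · exact hd x hx
          · simp only [List.mem_singleton] at hx
            subst hx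
            exact hc
        rw [hi', hn', hlst', ih rest (done ++ [c]) hd' (by simpa using Nat.lt_succ_iff.mp (by simpa using hlen))]
        rw [List.getLast?_concat, canon_cons_ne tchar _ rest hc]
        simp

lemma A_eq_canon (seq : String) (tchar : List (String × List String)) :
    clean_hash_runs seq tchar = String.ofList (canon tchar none seq.toList) := by
  unfold clean_hash_runs
  dsimp only
  rw [PySem.List.len_eq]
  congr 1
  have h := loopA_canon tchar (seq.toList.length + 1) seq.toList [] (by simp) (by omega)
  simp only [List.length_nil, Nat.zero_add, List.nil_append, List.getLast?_nil] at h
  exact h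

-- B-side: recursive descriptions of the two tables and the scan fold
def lastF : Option Char → List Char → Option Char
  | s, [] => s
  | s, c :: cs => lastF (if c != '#' then some c else s) cs

def pref : Option Char → List Char → List (Option Char)
  | _, [] => []
  | s, c :: cs => s :: pref (if c != '#' then some c else s) cs

def nextT : List Char → List (Option Char)
  | [] => [none]
  | c :: cs => (if c != '#' then some c else (nextT cs).headD none) :: nextT cs

def scanStep (tchar : List (String × List String)) (P N : List (Option Char)) :
    (List Char × Nat) → (Char × Nat) → (List Char × Nat) :=
  fun st p =>
    if p.1 == '#' then (st.1, st.2 + 1)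
    else if st.2 != 0 then
      (st.1 ++ List.replicate st.2
          (fillFor tchar (P.getD (p.2 - st.2) none) (N.getD p.2 none))
        ++ [p.1], 0)
    else (st.1 ++ [p.1], 0)

def finish (tchar : List (String × List String)) (P N : List (Option Char)) (n : Nat)
    (st : List Char × Nat) : List Char :=
  if st.2 != 0 then
    st.1 ++ List.replicate st.2
      (fillFor tchar (P.getD (n - st.2) none) (N.getD n none))
  else st.1

lemma foldPrev (l : List Char) : ∀ (acc : List (Option Char)) (s : Option Char),
    l.foldl (fun (st : List (Option Char) × Option Char) ch =>
        (st.2 :: st.1, if ch != '#' then some ch else st.2)) (acc, s)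
      = ((pref s l).reverse ++ acc, lastF s l) := by
  induction l with
  | nil => intro acc s; simp [pref, lastF]
  | cons c cs ih =>
    intro acc s
    rw [List.foldl_cons]
    dsimp only
    rw [ih]
    simp [pref, lastF]

lemma nextT_eq_foldr (l : List Char) :
    l.foldr (fun ch acc => (if ch != '#' then some ch else acc.headD none) :: acc) [none]
      = nextT l := by
  induction l with
  | nil => rfl
  | cons c cs ih => rw [List.foldr_cons, ih, nextT]

lemma length_pref : ∀ (l : List Char) (s : Option Char), (pref s l).length = l.length := by
  intro l
  induction l with
  | nil => intro s; rfl
  | cons c cs ih => intro s; simp [pref, ih]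

lemma pref_append : ∀ (xs : List Char) (s : Option Char) (ys : List Char),
    pref s (xs ++ ys) = pref s xs ++ pref (lastF s xs) ys := by
  intro xs
  induction xs with
  | nil => intro s ys; simp [pref, lastF]
  | cons c cs ih => intro s ys; simp [pref, lastF, ih]

lemma lastF_concat : ∀ (l : List Char) (s : Option Char) (c : Char),
    lastF s (l ++ [c]) = if c != '#' then some c else lastF s l := by
  intro l
  induction l with
  | nil => intro s c; rfl
  | cons x xs ih => intro s c; simp [lastF, ih]

lemma lastF_getLast (pre : List Char) (h : ∀ c, pre.getLast? = some c → c ≠ '#') :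
    lastF none pre = pre.getLast? := by
  rcases pre.eq_nil_or_concat' with rfl | ⟨l, c, rfl⟩
  · rfl
  · rw [lastF_concat, List.getLast?_concat]
    have hc : c ≠ '#' := h c List.getLast?_concat
    simp [hc]

lemma pref_getD (s : Option Char) (pre : List Char) (x : Char) (l2 : List Char) :
    (pref s (pre ++ x :: l2)).getD pre.length none = lastF s pre := by
  rw [pref_append, List.getD_eq_getElem?_getD,
    List.getElem?_append_right (by rw [length_pref]), length_pref]
  simp [pref]

lemma nextT_getD : ∀ (l : List Char) (k : Nat),
    (nextT l).getD k none = (l.drop k).find? (fun c => c != '#') := by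
  intro l
  induction l with
  | nil => intro k; cases k <;> simp [nextT]
  | cons c cs ih =>
    intro k
    cases k with
    | zero =>
      have h0 := ih 0
      simp only [List.drop_zero] at h0
      by_cases hc : c = '#'
      · subst hc
        simp only [nextT, List.drop_zero, List.getD_cons_zero]
        rw [List.find?_cons_of_neg (by simp)]
        rw [← h0]
        simp [List.headD_eq_head?_getD, List.head?_eq_getElem?, List.getD_eq_getElem?_getD]
      · simp only [nextT, List.drop_zero, List.getD_cons_zero]
        rw [List.find?_cons_of_pos (by simp [hc])]
        simp [hc]
    | succ k =>
      rw [show nextT (c :: cs)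
            = (if c != '#' then some c else (nextT cs).headD none) :: nextT cs from rfl,
        List.getD_cons_succ, ih k]
      rfl

lemma foldB_canon (tchar : List (String × List String)) (cs : List Char) :
    ∀ (todo pre : List Char) (run : Nat) (acc : List Char),
    cs = pre ++ (List.replicate run '#' ++ todo) →
    (∀ c, pre.getLast? = some c → c ≠ '#') →
    finish tchar (pref none cs) (nextT cs) cs.length
        ((todo.zipIdx (pre.length + run)).foldl
          (scanStep tchar (pref none cs) (nextT cs)) (acc, run))
      = acc ++ canon tchar pre.getLast? (List.replicate run '#' ++ todo) := by
  intro todo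
  induction todo with
  | nil =>
    intro pre run acc hcs hpre
    rw [List.zipIdx_nil, List.foldl_nil]
    rw [List.append_nil] at hcs ⊢
    by_cases hrun : run = 0
    · subst hrun
      simp [finish, canon_nil]
    · obtain ⟨r, rfl⟩ : ∃ r, run = r + 1 := ⟨run - 1, by omega⟩
      unfold finish
      rw [if_pos (by simp [hrun])]
      dsimp only
      have hlen : cs.length - (r + 1) = pre.length := by
        rw [hcs]; simp
      have hP : (pref none cs).getD (cs.length - (r + 1)) none = pre.getLast? := by
        rw [hlen, hcs, List.replicate_succ, pref_getD, lastF_getLast pre hpre]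
      have hN : (nextT cs).getD cs.length none = none := by
        rw [nextT_getD, List.drop_length]
        rfl
      rw [hP, hN]
      conv_rhs => rw [← List.append_nil (List.replicate (r + 1) '#')]
      rw [canon_run tchar _ [] (by omega) (by simp), canon_nil, List.append_nil]
      rfl
  | cons c rest ih =>
    intro pre run acc hcs hpre
    rw [List.zipIdx_cons, List.foldl_cons]
    by_cases hc : c = '#'
    · subst hc
      rw [show scanStep tchar (pref none cs) (nextT cs) (acc, run) ('#', pre.length + run)
            = (acc, run + 1) from rfl]
      have hcs' : cs = pre ++ (List.replicate (run + 1) '#' ++ rest) := by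
        rw [hcs, List.replicate_succ']
        simp
      have hidx : pre.length + run + 1 = pre.length + (run + 1) := by omega
      rw [hidx, ih pre (run + 1) acc hcs' hpre]
      congr 1
      rw [List.replicate_succ']
      simp
    · have hcbeq : (c == '#') = false := by simp [hc]
      by_cases hrun : run = 0
      · subst hrun
        rw [show scanStep tchar (pref none cs) (nextT cs) (acc, 0) (c, pre.length + 0)
              = (acc ++ [c], 0) from by simp [scanStep, hcbeq]]
        have hcs' : cs = (pre ++ [c]) ++ (List.replicate 0 '#' ++ rest) := by
          rw [hcs]; simp
        have hpre' : ∀ x, (pre ++ [c]).getLast? = some x → x ≠ '#' := by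
          intro x hx
          rw [List.getLast?_concat] at hx
          cases hx
          exact hc
        have hidx : pre.length + 0 + 1 = (pre ++ [c]).length + 0 := by simp
        rw [hidx, ih (pre ++ [c]) 0 (acc ++ [c]) hcs' hpre']
        rw [List.getLast?_concat]
        simp only [List.replicate_zero, List.nil_append]
        rw [canon_cons_ne tchar _ rest hc]
        simp
      · obtain ⟨r, rfl⟩ : ∃ r, run = r + 1 := ⟨run - 1, by omega⟩
        have hP : (pref none cs).getD (pre.length + (r + 1) - (r + 1)) none = pre.getLast? := by
          rw [show pre.length + (r + 1) - (r + 1) = pre.length by omega]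
          rw [hcs, List.replicate_succ, List.cons_append, pref_getD, lastF_getLast pre hpre]
        have hN : (nextT cs).getD (pre.length + (r + 1)) none = some c := by
          rw [nextT_getD]
          have hdrop : cs.drop (pre.length + (r + 1)) = c :: rest := by
            rw [hcs, ← List.append_assoc,
              show pre.length + (r + 1) = (pre ++ List.replicate (r + 1) '#').length by simp]
            exact List.drop_left
          rw [hdrop, List.find?_cons_of_pos (by simp [hc])]
        rw [show scanStep tchar (pref none cs) (nextT cs) (acc, r + 1) (c, pre.length + (r + 1))
              = (acc ++ List.replicate (r + 1)
                    (fillFor tchar ((pref none cs).getD (pre.length + (r + 1) - (r + 1)) none)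
                      ((nextT cs).getD (pre.length + (r + 1)) none))
                  ++ [c], 0) from by simp [scanStep, hcbeq]]
        rw [hP, hN]
        set fill := fillFor tchar pre.getLast? (some c) with hfill_def
        set pre' := pre ++ (List.replicate (r + 1) '#' ++ [c]) with hpre_def
        have hcs' : cs = pre' ++ (List.replicate 0 '#' ++ rest) := by
          rw [hcs, hpre_def]
          simp
        have hlast' : pre'.getLast? = some c := by
          rw [hpre_def, ← List.append_assoc, List.getLast?_concat]
        have hpre'' : ∀ x, pre'.getLast? = some x → x ≠ '#' := by
          intro x hx
          rw [hlast'] at hx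
          cases hx
          exact hc
        have hidx : pre.length + (r + 1) + 1 = pre'.length + 0 := by
          rw [hpre_def]
          simp only [List.length_append, List.length_replicate, List.length_cons,
            List.length_nil, Nat.add_zero]
          omega
        rw [hidx, ih pre' 0 (acc ++ List.replicate (r + 1) fill ++ [c]) hcs' hpre'']
        rw [hlast']
        simp only [List.replicate_zero, List.nil_append]
        conv_rhs => rw [canon_run tchar _ (c :: rest) (by omega)
          (by intro x hx; cases hx; exact hc)]
        rw [canon_cons_ne tchar _ rest hc]
        simp [hfill_def]

lemma B_eq_canon (seq : String) (tchar : List (String × List String)) :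
    clean_hash_runs_alt seq tchar = String.ofList (canon tchar none seq.toList) := by
  unfold clean_hash_runs_alt
  dsimp only
  rw [foldPrev seq.toList [] none]
  dsimp only
  rw [List.append_nil, List.reverse_reverse, nextT_eq_foldr]
  have h := foldB_canon tchar seq.toList seq.toList [] 0 [] (by simp) (by simp)
  simp only [List.length_nil, Nat.add_zero, List.replicate_zero, List.nil_append,
    List.getLast?_nil] at h
  exact congrArg String.ofList h

theorem clean_hash_runs_spec : Claim_equal_clean_hash_runs := by
  intro seq tchar _
  show clean_hash_runs seq tchar = clean_hash_runs_alt seq tchar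
  rw [A_eq_canon, B_eq_canon]
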